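-- pv_equiv track=rewrite | github.com/budaizalan/nebukjunkmarmeg | gyak/main.py | szakasz
-- ===== SOURCE A (Python) =====
-- def szakasz(hőmérséklet: list[int]) -> int:
--     aktuális: int = 0
--     maxhossz: int = 0
--     for h in hőmérséklet:
--         if h < 0:
--             aktuális += 1
--         else:
--             if aktuális >= maxhossz:
--                 maxhossz = aktuális
--             aktuális = 0
--     if aktuális > maxhossz:
--         maxhossz = aktuális
--     return maxhossz
-- ===== SOURCE B (Python) =====
-- def szakasz(hőmérséklet: list[int]) -> int:
--     n = len(hőmérséklet)
--     best = 0
--     i = 0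
--     while i < n:
--         if hőmérséklet[i] < 0:
--             j = i + 1
--             while j < n and hőmérséklet[j] < 0:
--                 j += 1
--             if j - i > best:
--                 best = j - i
--             i = j
--         else:
--             i += 1
--     return best
-- ===== Notes on version B (the rewrite author's own statement) =====
-- stated objective: alternative
-- what changed: Replaces the single-counter scan (incremental run counter with a post-loop fixup) by an outer index scan that, at each negative element, extends an inner scan to the end of that maximal negative run and records its length directly, so no counter/fixup state is carried across iterations.
import Mathlib
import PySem

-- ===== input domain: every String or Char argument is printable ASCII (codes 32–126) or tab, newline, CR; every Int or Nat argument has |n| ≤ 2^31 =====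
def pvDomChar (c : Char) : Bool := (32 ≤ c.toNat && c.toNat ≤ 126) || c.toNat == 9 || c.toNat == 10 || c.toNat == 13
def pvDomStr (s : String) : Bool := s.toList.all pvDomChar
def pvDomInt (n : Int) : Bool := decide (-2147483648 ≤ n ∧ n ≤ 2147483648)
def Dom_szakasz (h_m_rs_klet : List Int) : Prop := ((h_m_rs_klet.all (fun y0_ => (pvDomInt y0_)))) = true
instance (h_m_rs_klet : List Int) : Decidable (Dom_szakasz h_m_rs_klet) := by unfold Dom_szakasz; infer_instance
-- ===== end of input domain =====

-- B replaces A's incremental counter + post-loop fixup by an outer index scan with an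
-- inner scan over each maximal negative run (alternative decomposition, same cost).


-- ===== PORT A =====
-- A's loop: state (aktuális, maxhossz) folded over the list, then the final fixup.
def szakaszStep (p : Int × Int) (h : Int) : Int × Int :=
  if h < 0 then (p.1 + 1, p.2)
  else (0, if p.1 ≥ p.2 then p.1 else p.2)

def szakasz (h_m_rs_klet : List Int) : Int :=
  let s := h_m_rs_klet.foldl szakaszStep (0, 0)
  if s.1 > s.2 then s.1 else s.2

-- ===== PORT B =====
-- inner `while j < n and t[j] < 0: j += 1`
def runEnd (t : List Int) (j : Nat) : Nat :=
  if h : j < t.length then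
    if t[j] < 0 then runEnd t (j + 1) else j
  else j
termination_by t.length - j

-- runEnd never moves backwards (used for the outer loop's termination)
theorem runEnd_ge (t : List Int) (j : Nat) : j ≤ runEnd t j := by
  unfold runEnd
  split
  · split
    · exact le_trans (Nat.le_succ j) (runEnd_ge t (j + 1))
    · exact le_refl j
  · exact le_refl j
termination_by t.length - j

-- outer `while i < n` loop of B, carrying `best`
def loopB (t : List Int) (i : Nat) (best : Int) : Int :=
  if h : i < t.length then
    if t[i] < 0 then
      let j := runEnd t (i + 1)
      loopB t j (if (j : Int) - (i : Int) > best then (j : Int) - (i : Int) else best)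
    else loopB t (i + 1) best
  else best
termination_by t.length - i
decreasing_by
  · have := runEnd_ge t (i + 1); omega
  · omega

def szakasz_alt (h_m_rs_klet : List Int) : Int := loopB h_m_rs_klet 0 0

-- ===== PRECONDITION & SPEC =====
def Spec_szakasz (h_m_rs_klet : List Int) (out : Int) : Prop := out = szakasz_alt h_m_rs_klet
instance (h_m_rs_klet : List Int) (out : Int) : Decidable (Spec_szakasz h_m_rs_klet out) := by unfold Spec_szakasz; infer_instance

-- ===== CLAIM (what is proved, stated in full; the proofs are below) =====
def Claim_equal_szakasz : Prop := ∀ (h_m_rs_klet : List Int), Dom_szakasz h_m_rs_klet → Spec_szakasz h_m_rs_klet (szakasz h_m_rs_klet)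

-- ===== LEMMAS AND PROOFS =====

def szakaszFinish (p : Int × Int) : Int := if p.1 > p.2 then p.1 else p.2

theorem runEnd_le (t : List Int) (j : Nat) : runEnd t j ≤ t.length ∨ runEnd t j = j := by
  unfold runEnd
  split
  · split
    · rcases runEnd_le t (j + 1) with h' | h'
      · exact Or.inl h'
      · left; omega
    · right; rfl
  · right; rfl
termination_by t.length - j

-- at the position runEnd stops, either the list is exhausted or the element is nonnegative
theorem runEnd_stop (t : List Int) (j : Nat) :
    t.length ≤ runEnd t j ∨ ∃ h : runEnd t j < t.length, ¬ t[runEnd t j] < 0 := by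
  unfold runEnd
  split
  case isTrue h =>
    split
    · exact runEnd_stop t (j + 1)
    case isFalse hn => exact Or.inr ⟨h, hn⟩
  case isFalse h => left; omega
termination_by t.length - j

-- folding A's step over the negative run from j to runEnd t j just adds its length to aktuális
theorem foldl_run (t : List Int) (j : Nat) (akt b : Int) :
    (t.drop j).foldl szakaszStep (akt, b)
      = (t.drop (runEnd t j)).foldl szakaszStep (akt + ((runEnd t j : Int) - (j : Int)), b) := by
  unfold runEnd
  split
  case isTrue h =>
    split
    case isTrue hneg =>
      have hd : t[j] :: t.drop (j + 1) = t.drop j := List.getElem_cons_drop ..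
      rw [← hd]
      have hstep : szakaszStep (akt, b) t[j] = (akt + 1, b) := by
        simp [szakaszStep, hneg]
      rw [List.foldl_cons, hstep, foldl_run t (j + 1) (akt + 1) b]
      have := runEnd_ge t (j + 1)
      congr 2
      push_cast
      ring
    case isFalse =>
      norm_num
  case isFalse =>
    norm_num
termination_by t.length - j

-- resetting aktuális into maxhossz at a run boundary commutes with the rest of the fold
theorem finish_reset (t : List Int) (j : Nat) (k b : Int)
    (hk : 0 ≤ k) (hb : 0 ≤ b)
    (hstop : t.length ≤ j ∨ ∃ h : j < t.length, ¬ t[j] < 0) :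
    szakaszFinish ((t.drop j).foldl szakaszStep (k, b))
      = szakaszFinish ((t.drop j).foldl szakaszStep (0, if k > b then k else b)) := by
  rcases hstop with h | ⟨h, hnn⟩
  · rw [List.drop_eq_nil_of_le h]
    simp only [List.foldl_nil, szakaszFinish]
    split_ifs <;> omega
  · have hd : t[j] :: t.drop (j + 1) = t.drop j := List.getElem_cons_drop ..
    rw [← hd]
    simp only [List.foldl_cons, szakaszStep, if_neg hnn]
    have hpair : (if k ≥ b then k else b)
        = (if (0 : Int) ≥ (if k > b then k else b) then 0 else (if k > b then k else b)) := by
      split_ifs <;> omega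
    rw [hpair]

-- main invariant: B's outer loop from position i with running best equals
-- A's fold over the remaining suffix started with aktuális = 0, maxhossz = best
theorem loopB_eq (t : List Int) (i : Nat) (best : Int) (hb : 0 ≤ best) :
    loopB t i best = szakaszFinish ((t.drop i).foldl szakaszStep (0, best)) := by
  unfold loopB
  split
  case isTrue h =>
    have hd : t[i] :: t.drop (i + 1) = t.drop i := List.getElem_cons_drop ..
    split
    case isTrue hneg =>
      set j := runEnd t (i + 1) with hj
      have hge : i + 1 ≤ j := runEnd_ge t (i + 1)
      have hb' : (0 : Int) ≤ (if (j : Int) - (i : Int) > best then (j : Int) - (i : Int) else best) := by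
        split_ifs <;> omega
      rw [loopB_eq t j _ hb']
      rw [← hd, List.foldl_cons]
      have hstep : szakaszStep (0, best) t[i] = (1, best) := by
        simp [szakaszStep, hneg]
      rw [hstep, foldl_run t (i + 1) 1 best, ← hj]
      rw [finish_reset t j (1 + ((j : Int) - ((i : Nat) + 1 : Nat))) best (by push_cast; omega) hb
            (runEnd_stop t (i + 1))]
      have hk : (1 + ((j : Int) - ((i : Nat) + 1 : Nat))) = (j : Int) - (i : Int) := by
        push_cast; ring
      rw [hk]
    case isFalse hnn =>
      rw [loopB_eq t (i + 1) best hb]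
      rw [← hd, List.foldl_cons]
      have hstep : szakaszStep (0, best) t[i] = (0, best) := by
        simp only [szakaszStep, if_neg hnn]
        congr 1
        split_ifs <;> omega
      rw [hstep]
  case isFalse h =>
    rw [List.drop_eq_nil_of_le (by omega)]
    simp only [List.foldl_nil, szakaszFinish]
    split_ifs <;> omega
termination_by t.length - i
decreasing_by
  · have := runEnd_ge t (i + 1); omega
  · omega

-- ===== VERDICT (by name: the statement is the Claim_ definition above) =====
theorem szakasz_spec : Claim_equal_szakasz := by
  intro t _
  unfold Spec_szakasz szakasz szakasz_alt
  rw [loopB_eq t 0 0 le_rfl]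
  rfl
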